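-- pv_equiv track=rewrite | github.com/m0r4a/Cryptography | HILL/functions/letter_to_number.py | letter_to_number
-- ===== SOURCE A (Python) =====
-- def char_to_number(char):
--     string = "ABCDEFGHIJKLMNOPQRSTUVWXYZ"
--     special_chars = "@#$%^&*!(){}[]|\\/<>+=_-;:.,"
--     if char in special_chars:
--         return len(string) + special_chars.index(char)
--     elif char in string:
--         return string.index(char)
--     else:
--         return "Char not found"
--
-- def letter_to_number(alphabet_size: int, block_size: int, string):
--     """
--     Function to transform letters into numbers according to the AFIN encryption method.
--
--     :param int alphabet_size: This is the amount of characters you have in your alphabet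
--     :param int block_size: This is the graph "level"
--     :param str string: This is the string you want to convert into a number
--
--     :return: The number obtained upon the letters
--     """
--
--     # Divide el string en bloques del tamaño especificado
--     blocks = [string[i:i + block_size] for i in range(0, len(string), block_size)]
--
--     # Convierte cada bloque en su representación numérica
--     decimal_values = []
--     for block in blocks:
--         decimal_value = 0
--         for i, char in enumerate(reversed(block)):
--             # Convertir el carácter a su número correspondiente
--             numeric_value = char_to_number(char)
--             decimal_value += int(numeric_value) * (alphabet_size ** i)
--         decimal_values.append(decimal_value)
--
--     return decimal_values
-- ===== SOURCE B (Python) =====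
-- def char_to_number(char):
--     string = "ABCDEFGHIJKLMNOPQRSTUVWXYZ"
--     special_chars = "@#$%^&*!(){}[]|\\/<>+=_-;:.,"
--     if char in special_chars:
--         return len(string) + special_chars.index(char)
--     elif char in string:
--         return string.index(char)
--     else:
--         return "Char not found"
--
-- def letter_to_number(alphabet_size: int, block_size: int, string):
--     """Same conversion, but computed with ceiling-division block count and
--     Horner's method (running accumulator) instead of reversed enumeration
--     with explicit powers."""
--     num_blocks = -(-len(string) // block_size)
--     decimal_values = []
--     for b in range(num_blocks):
--         value = 0
--         for char in string[b * block_size:(b + 1) * block_size]: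
--             value = value * alphabet_size + int(char_to_number(char))
--         decimal_values.append(value)
--     return decimal_values
-- ===== Notes on version B (the rewrite author's own statement) =====
-- stated objective: alternative
-- what changed: The block count is computed by ceiling division instead of a stepped range, and each block's value is accumulated left-to-right with Horner's method instead of summing alphabet_size**i weighted terms over the reversed block.
import Mathlib
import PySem

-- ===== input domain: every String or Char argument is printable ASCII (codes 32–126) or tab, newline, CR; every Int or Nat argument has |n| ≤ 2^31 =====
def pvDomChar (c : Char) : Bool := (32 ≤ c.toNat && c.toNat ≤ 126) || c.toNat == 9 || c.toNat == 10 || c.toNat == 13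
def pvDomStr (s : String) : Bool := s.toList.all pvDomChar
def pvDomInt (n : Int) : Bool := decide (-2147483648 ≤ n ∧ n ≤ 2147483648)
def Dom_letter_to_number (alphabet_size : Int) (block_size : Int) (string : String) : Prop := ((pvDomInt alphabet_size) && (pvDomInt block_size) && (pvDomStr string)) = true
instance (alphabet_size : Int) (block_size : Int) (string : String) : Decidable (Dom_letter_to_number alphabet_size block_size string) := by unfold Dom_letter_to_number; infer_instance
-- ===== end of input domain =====

-- B replaces A's reversed-enumeration-with-powers inner loop by Horner's method and
-- computes the number of blocks by ceiling division instead of a stepped range (objective: alternative).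

-- ===== PORT A =====
-- shared module helper char_to_number: the two alphabet string constants as char lists
def pvLetters : List Char := "ABCDEFGHIJKLMNOPQRSTUVWXYZ".toList
def pvSpecials : List Char := "@#$%^&*!(){}[]|\\/<>+=_-;:.,".toList

-- char_to_number followed by int(...): returns none exactly where Python's int("Char not found")
-- raises ValueError; membership and .index on these ASCII string constants are exact on char lists
def pvCharToNumber? (c : Char) : Option Int :=
  if pvSpecials.contains c then
    some ((26 : Int) + ((PySem.List.index? pvSpecials c).getD 0 : Nat))
  else if pvLetters.contains c then
    some (((PySem.List.index? pvLetters c).getD 0 : Nat) : Int)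
  else none

def letter_to_number (alphabet_size : Int) (block_size : Int) (string : String) : List Int :=
  let cs := string.toList
  let blocks : List (List Char) :=
    (PySem.List.pyRange 0 (cs.length : Int) block_size).map
      (fun i => PySem.List.slice cs (some i) (some (i + block_size)))
  blocks.foldl
    (fun decimal_values block =>
      decimal_values ++
        [(PySem.List.enumerate block.reverse 0).foldl
           (fun decimal_value p =>
             decimal_value + ((pvCharToNumber? p.2).getD 0) * alphabet_size ^ p.1.toNat)
           0])
    []

-- ===== PORT B =====
def letter_to_number_alt (alphabet_size : Int) (block_size : Int) (string : String) : List Int :=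
  let cs := string.toList
  let num_blocks : Int := -(PySem.Int.floordiv (-(cs.length : Int)) block_size)
  (PySem.List.pyRange 0 num_blocks 1).foldl
    (fun decimal_values b =>
      decimal_values ++
        [(PySem.List.slice cs (some (b * block_size)) (some ((b + 1) * block_size))).foldl
           (fun value c => value * alphabet_size + (pvCharToNumber? c).getD 0)
           0])
    []

-- ===== PRECONDITION & SPEC =====
-- Pre_ excludes exactly the inputs where Python A raises: block_size = 0 (range step 0,
-- ValueError) and, when block_size > 0 (so the blocks actually cover the string), a string
-- containing a character outside the two alphabet constants (int("Char not found"),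
-- ValueError).  B raises on the same inputs.
def Pre_letter_to_number (alphabet_size : Int) (block_size : Int) (string : String) : Prop :=
  block_size ≠ 0 ∧
    (0 < block_size →
      string.toList.all (fun c => pvSpecials.contains c || pvLetters.contains c) = true)

instance (alphabet_size : Int) (block_size : Int) (string : String) : Decidable (Pre_letter_to_number alphabet_size block_size string) := by unfold Pre_letter_to_number; infer_instance

def pvWitness_letter_to_number : Int × Int × String := (27, 2, "HI.")

def Spec_letter_to_number (alphabet_size : Int) (block_size : Int) (string : String) (out : List Int) : Prop := out = letter_to_number_alt alphabet_size block_size string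
instance (alphabet_size : Int) (block_size : Int) (string : String) (out : List Int) : Decidable (Spec_letter_to_number alphabet_size block_size string out) := by unfold Spec_letter_to_number; infer_instance

-- ===== CLAIM (what is proved, stated in full; the proofs are below) =====
def Claim_equal_letter_to_number : Prop := ∀ (alphabet_size : Int) (block_size : Int) (string : String), Dom_letter_to_number alphabet_size block_size string → Pre_letter_to_number alphabet_size block_size string → Spec_letter_to_number alphabet_size block_size string (letter_to_number alphabet_size block_size string)

-- ===== LEMMAS AND PROOFS =====

-- B's inner Horner loop as a function of the block
def pvHorner (A : Int) (l : List Char) : Int :=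
  l.foldl (fun value c => value * A + (pvCharToNumber? c).getD 0) 0

theorem pvHorner_init (A : Int) (l : List Char) (init : Int) :
    l.foldl (fun value c => value * A + (pvCharToNumber? c).getD 0) init
      = init * A ^ l.length + pvHorner A l := by
  induction l generalizing init with
  | nil => simp [pvHorner]
  | cons c t ih =>
      simp only [List.foldl_cons, List.length_cons, pvHorner]
      rw [ih, ih ((0 : Int) * A + (pvCharToNumber? c).getD 0)]
      ring

theorem pvEnumerate_append_singleton {α : Type} (l : List α) (x : α) (s : Int) :
    PySem.List.enumerate (l ++ [x]) s
      = PySem.List.enumerate l s ++ [(s + l.length, x)] := by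
  induction l generalizing s with
  | nil => simp [PySem.List.enumerate_cons, PySem.List.enumerate_nil]
  | cons y t ih =>
      simp only [List.cons_append, PySem.List.enumerate_cons, ih, List.length_cons]
      push_cast
      rw [show s + 1 + (t.length : Int) = s + ((t.length : Int) + 1) by ring]

-- A's inner loop (reversed enumeration with powers) equals Horner's method
theorem pvPowsum_eq_horner (A : Int) (r : List Char) (acc : Int) :
    (PySem.List.enumerate r 0).foldl
        (fun dv p => dv + ((pvCharToNumber? p.2).getD 0) * A ^ p.1.toNat) acc
      = acc + pvHorner A r.reverse := by
  induction r using List.reverseRecOn generalizing acc with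
  | nil => simp [pvHorner, PySem.List.enumerate_nil]
  | append_singleton t c ih =>
      rw [pvEnumerate_append_singleton, List.foldl_append, ih]
      simp only [List.foldl_cons, List.foldl_nil, List.reverse_append,
        List.reverse_singleton, List.singleton_append]
      have h1 : pvHorner A (c :: t.reverse)
          = ((0 : Int) * A + (pvCharToNumber? c).getD 0) * A ^ t.reverse.length
              + pvHorner A t.reverse := by
        simp only [pvHorner, List.foldl_cons]
        exact pvHorner_init A t.reverse _
      rw [h1, List.length_reverse]
      have h2 : ((0 : Int) + (t.length : Int)).toNat = t.length := by omega
      rw [h2]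
      ring

theorem pvBlockValue (A : Int) (block : List Char) :
    (PySem.List.enumerate block.reverse 0).foldl
        (fun dv p => dv + ((pvCharToNumber? p.2).getD 0) * A ^ p.1.toNat) 0
      = pvHorner A block := by
  rw [pvPowsum_eq_horner, List.reverse_reverse, zero_add]

-- the stepped range of A's block starts equals B's [0, num_blocks) scaled by block_size
theorem pvRange_step_eq (n bs : Int) (hn : 0 ≤ n) (hbs : bs ≠ 0) :
    PySem.List.pyRange 0 n bs
      = (PySem.List.pyRange 0 (-(PySem.Int.floordiv (-n) bs)) 1).map (· * bs) := by
  rcases lt_or_gt_of_ne hbs with hneg | hpos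
  · have h1 : PySem.List.pyRange 0 n bs = [] := by
      simp only [PySem.List.pyRange, hbs, if_neg (not_lt.2 (le_of_lt hneg)),
        if_neg (not_lt.2 hn)]
      simp
    have h2 : -(PySem.Int.floordiv (-n) bs) ≤ 0 := by
      have : PySem.Int.floordiv (-n) bs = PySem.Int.floordiv n (-bs) := by
        rw [← PySem.Int.floordiv_neg_neg n (-bs), neg_neg]
      rw [this, PySem.Int.floordiv_eq_ediv_of_pos (by omega)]
      have := Int.ediv_nonneg hn (by omega : (0:Int) ≤ -bs)
      omega
    rw [h1, PySem.List.pyRange_one_eq_nil h2, List.map_nil]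
  · set m : Int := -(PySem.Int.floordiv (-n) bs) with hm
    have hbr : (m - 1) * bs < n ∧ n ≤ m * bs :=
      (PySem.Int.neg_floordiv_neg_eq_iff_of_pos hpos).1 hm.symm
    have hm0 : 0 ≤ m := by nlinarith [hbr.1, hbr.2]
    rw [PySem.List.pyRange_of_pos 0 n hpos, PySem.List.pyRange_one, List.map_map]
    have hcount : (if (0:Int) < n then ((n - 0 + bs - 1) / bs).toNat else 0) = m.toNat := by
      by_cases hn0 : (0:Int) < n
      · rw [if_pos hn0]
        congr 1
        rw [sub_zero, ← PySem.Int.floordiv_eq_ediv_of_pos hpos,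
          PySem.Int.floordiv_eq_iff_of_pos hpos]
        constructor <;> nlinarith [hbr.1, hbr.2]
      · rw [if_neg hn0]
        have hmz : m = 0 := by nlinarith [hbr.1, hbr.2]
        simp [hmz]
    rw [hcount, sub_zero]
    apply List.map_congr_left
    intro k _
    simp only [Function.comp_apply, zero_add]
    ring

-- the two block decompositions coincide
theorem pvBlocks_eq (cs : List Char) (bs : Int) (hbs : bs ≠ 0) :
    (PySem.List.pyRange 0 (cs.length : Int) bs).map
        (fun i => PySem.List.slice cs (some i) (some (i + bs)))
      = (PySem.List.pyRange 0 (-(PySem.Int.floordiv (-(cs.length : Int)) bs)) 1).map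
          (fun b => PySem.List.slice cs (some (b * bs)) (some ((b + 1) * bs))) := by
  rw [pvRange_step_eq (cs.length : Int) bs (by positivity) hbs, List.map_map]
  apply List.map_congr_left
  intro b _
  simp only [Function.comp_apply]
  congr 2
  ring

-- ===== VERDICT (by name: the statement is the Claim_ definition above) =====
theorem letter_to_number_spec : Claim_equal_letter_to_number := by
  intro alphabet_size block_size string _hDom hPre
  unfold Spec_letter_to_number letter_to_number letter_to_number_alt
  simp only [PySem.List.foldl_append_singleton_eq_map, List.nil_append, List.map_map,
    pvBlockValue]
  rw [← List.map_map (g := pvHorner alphabet_size)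
      (f := fun i => PySem.List.slice string.toList (some i) (some (i + block_size))),
    pvBlocks_eq string.toList block_size hPre.1, List.map_map]
  apply List.map_congr_left
  intro b _
  simp [pvHorner]
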